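-- pv_equiv track=rewrite | github.com/pabsalas14/appsec-platform | backend/app/services/sla_policy.py | _severity_keys
-- ===== SOURCE A (Python) =====
-- def _norm(value: str | None) -> str:
--     return (value or "").strip().lower().replace("á", "a")
--
-- def _severity_keys(severity: str | None) -> list[str]:
--     s = _norm(severity)
--     out = [s]
--     aliases = {
--         "critica": ["critica", "critical"],
--         "alta": ["alta", "high"],
--         "media": ["media", "medium"],
--         "baja": ["baja", "low"],
--         "informativa": ["informativa", "info", "informational"],
--         "info": ["informativa", "info", "informational"],
--     }
--     for canon, keys in aliases.items():
--         if s in keys: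
--             out = [*keys, canon]
--             break
--     # preserve order while deduplicating
--     seen: set[str] = set()
--     dedup: list[str] = []
--     for k in out:
--         if k and k not in seen:
--             seen.add(k)
--             dedup.append(k)
--     return dedup
-- ===== SOURCE B (Python) =====
-- def _norm(value):
--     return (value or "").strip().lower().replace("\u00e1", "a")
--
--
-- _TABLE = {
--     "critica": ["critica", "critical"],
--     "critical": ["critica", "critical"],
--     "alta": ["alta", "high"],
--     "high": ["alta", "high"],
--     "media": ["media", "medium"],
--     "medium": ["media", "medium"],
--     "baja": ["baja", "low"],
--     "low": ["baja", "low"],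
--     "informativa": ["informativa", "info", "informational"],
--     "info": ["informativa", "info", "informational"],
--     "informational": ["informativa", "info", "informational"],
-- }
--
--
-- def _severity_keys(severity):
--     s = _norm(severity)
--     if not s:
--         return []
--     return list(_TABLE.get(s, [s]))
-- ===== Notes on version B (the rewrite author's own statement) =====
-- stated objective: simpler
-- what changed: Replaces A's scan-with-break over canon->keys pairs plus a separate order-preserving dedup pass with a single direct lookup in a precomputed flat alias->result table (empty normalized input returns [], unknown input returns [s]).
import Mathlib
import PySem

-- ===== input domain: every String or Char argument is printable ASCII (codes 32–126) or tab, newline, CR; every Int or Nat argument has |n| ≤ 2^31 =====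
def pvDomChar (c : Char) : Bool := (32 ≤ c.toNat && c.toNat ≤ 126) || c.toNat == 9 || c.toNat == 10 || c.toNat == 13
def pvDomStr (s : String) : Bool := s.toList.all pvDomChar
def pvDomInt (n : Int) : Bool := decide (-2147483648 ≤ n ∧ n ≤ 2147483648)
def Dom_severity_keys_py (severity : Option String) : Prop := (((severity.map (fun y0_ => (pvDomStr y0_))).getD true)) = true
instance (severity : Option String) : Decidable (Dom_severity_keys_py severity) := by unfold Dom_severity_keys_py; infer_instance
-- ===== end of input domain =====

-- B replaces A's scan-with-break over canon→keys plus a separate order-preserving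
-- dedup pass by ONE direct lookup in a precomputed flat alias→result table (objective: simpler).

-- ===== PORT A =====
-- _norm, shared verbatim by A and B (B keeps it unchanged)
def pvNorm (value : Option String) : String :=
  PySem.Str.replace (PySem.Str.lower (PySem.Str.strip (value.getD ""))) "á" "a"

def pvAliases : List (String × List String) :=
  [("critica", ["critica", "critical"]),
   ("alta", ["alta", "high"]),
   ("media", ["media", "medium"]),
   ("baja", ["baja", "low"]),
   ("informativa", ["informativa", "info", "informational"]),
   ("info", ["informativa", "info", "informational"])]

-- the 'for canon, keys in aliases.items(): if s in keys: out = [*keys, canon]; break' loop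
def pvScan (s : String) : List (String × List String) → List String → List String
  | [], out => out
  | (canon, keys) :: rest, out =>
      if keys.contains s then keys ++ [canon] else pvScan s rest out

-- the order-preserving dedup loop ('if k and k not in seen')
def pvDedup : List String → PySem.Set String → List String → List String
  | [], _, dedup => dedup
  | k :: rest, seen, dedup =>
      if k ≠ "" ∧ ¬ PySem.Set.contains seen k then
        pvDedup rest (PySem.Set.add seen k) (dedup ++ [k])
      else
        pvDedup rest seen dedup

def severity_keys_py (severity : Option String) : List String :=
  let s := pvNorm severity
  pvDedup (pvScan s pvAliases [s]) PySem.Set.empty []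

-- ===== PORT B =====
-- flat table: every alias string → the final deduplicated key list
def pvTable : PySem.Dict String (List String) :=
  PySem.Dict.mk
  [("critica", ["critica", "critical"]),
   ("critical", ["critica", "critical"]),
   ("alta", ["alta", "high"]),
   ("high", ["alta", "high"]),
   ("media", ["media", "medium"]),
   ("medium", ["media", "medium"]),
   ("baja", ["baja", "low"]),
   ("low", ["baja", "low"]),
   ("informativa", ["informativa", "info", "informational"]),
   ("info", ["informativa", "info", "informational"]),
   ("informational", ["informativa", "info", "informational"])]

def severity_keys_py_alt (severity : Option String) : List String :=
  let s := pvNorm severity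
  if s = "" then [] else PySem.Dict.getD pvTable s [s]

-- ===== PRECONDITION & SPEC =====
def Spec_severity_keys_py (severity : Option String) (out : List String) : Prop := out = severity_keys_py_alt severity
instance (severity : Option String) (out : List String) : Decidable (Spec_severity_keys_py severity out) := by unfold Spec_severity_keys_py; infer_instance

-- ===== CLAIM (what is proved, stated in full; the proofs are below) =====
def Claim_equal_severity_keys_py : Prop := ∀ (severity : Option String), Dom_severity_keys_py severity → Spec_severity_keys_py severity (severity_keys_py severity)

-- ===== LEMMAS AND PROOFS =====

-- both bodies depend on the input only through t = pvNorm severity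
theorem pv_key (t : String) :
    pvDedup (pvScan t pvAliases [t]) PySem.Set.empty [] =
      (if t = "" then [] else PySem.Dict.getD pvTable t [t]) := by
  by_cases h1 : t = "critica"; · subst h1; decide
  by_cases h2 : t = "critical"; · subst h2; decide
  by_cases h3 : t = "alta"; · subst h3; decide
  by_cases h4 : t = "high"; · subst h4; decide
  by_cases h5 : t = "media"; · subst h5; decide
  by_cases h6 : t = "medium"; · subst h6; decide
  by_cases h7 : t = "baja"; · subst h7; decide
  by_cases h8 : t = "low"; · subst h8; decide
  by_cases h9 : t = "informativa"; · subst h9; decide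
  by_cases h10 : t = "info"; · subst h10; decide
  by_cases h11 : t = "informational"; · subst h11; decide
  by_cases h0 : t = ""
  · subst h0; decide
  · have b1 : ("critica" == t) = false := by simp [Ne.symm h1]
    have b2 : ("critical" == t) = false := by simp [Ne.symm h2]
    have b3 : ("alta" == t) = false := by simp [Ne.symm h3]
    have b4 : ("high" == t) = false := by simp [Ne.symm h4]
    have b5 : ("media" == t) = false := by simp [Ne.symm h5]
    have b6 : ("medium" == t) = false := by simp [Ne.symm h6]
    have b7 : ("baja" == t) = false := by simp [Ne.symm h7]
    have b8 : ("low" == t) = false := by simp [Ne.symm h8]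
    have b9 : ("informativa" == t) = false := by simp [Ne.symm h9]
    have b10 : ("info" == t) = false := by simp [Ne.symm h10]
    have b11 : ("informational" == t) = false := by simp [Ne.symm h11]
    simp [pvScan, pvAliases, pvTable, pvDedup, PySem.Dict.getD, PySem.Dict.get?,
      PySem.Set.contains, PySem.Set.empty, List.find?,
      h1, h2, h3, h4, h5, h6, h7, h8, h9, h10, h11, h0,
      b1, b2, b3, b4, b5, b6, b7, b8, b9, b10, b11]

-- ===== VERDICT (by name: the statement is the Claim_ definition above) =====
theorem severity_keys_py_spec : Claim_equal_severity_keys_py := by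
  intro severity _
  unfold Spec_severity_keys_py severity_keys_py severity_keys_py_alt
  exact pv_key (pvNorm severity)
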